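-- pv_equiv track=rewrite | github.com/taechanha/PS | skillTrees.py | check
-- ===== SOURCE A (Python) =====
-- def check(skill, skill_tree):
--     if skill == '' or skill_tree == '':
--         return 1
--     if skill_tree[0] in skill:
--         if skill_tree[0] != skill[0]:
--             return 0
--         else:
--             return check(skill[1:], skill_tree[1:])
--     else:
--         return check(skill, skill_tree[1:])
-- ===== SOURCE B (Python) =====
-- def check(skill, skill_tree):
--     i = 0
--     for c in skill_tree:
--         if c in skill[i:]:
--             if c != skill[i]:
--                 return 0
--             i += 1
--     return 1
-- ===== Notes on version B (the rewrite author's own statement) =====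
-- stated objective: idiomatic
-- what changed: Replaced the tail recursion that rebuilds both string suffixes with a single for-loop over skill_tree's characters keeping one integer pointer into skill (membership tested against skill[i:]).
import Mathlib
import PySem

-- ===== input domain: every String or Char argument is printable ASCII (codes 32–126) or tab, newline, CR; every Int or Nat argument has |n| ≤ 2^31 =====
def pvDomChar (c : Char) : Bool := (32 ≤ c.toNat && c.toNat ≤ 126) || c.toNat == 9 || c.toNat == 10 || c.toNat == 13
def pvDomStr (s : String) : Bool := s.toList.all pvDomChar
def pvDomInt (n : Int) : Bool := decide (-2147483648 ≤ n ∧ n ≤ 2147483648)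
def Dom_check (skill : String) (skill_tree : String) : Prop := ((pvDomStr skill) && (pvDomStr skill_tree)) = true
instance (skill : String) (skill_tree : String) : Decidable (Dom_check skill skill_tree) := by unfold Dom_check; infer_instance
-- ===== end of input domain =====

-- ===== PORT A =====
-- Literal port of A: recursion consuming both strings (as char lists), membership in the whole remaining skill.
def checkA : List Char → List Char → Int
  | [], _ => 1
  | _, [] => 1
  | s :: ss, t :: ts =>
    if t ∈ (s :: ss) then
      if t ≠ s then 0 else checkA ss ts
    else checkA (s :: ss) ts

def check (skill : String) (skill_tree : String) : Int :=
  checkA skill.toList skill_tree.toList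

-- ===== PORT B =====
-- Port of B: one loop over skill_tree with an integer pointer i into the fixed skill;
-- skill[i] is ported as getD (the membership guard `c ∈ skill.drop i` ensures i is in range, exact w.r.t. Python).
def checkB (skill : List Char) : List Char → Nat → Int
  | [], _ => 1
  | c :: cs, i =>
    if c ∈ skill.drop i then
      if c ≠ skill.getD i ' ' then 0
      else checkB skill cs (i + 1)
    else checkB skill cs i

def check_alt (skill : String) (skill_tree : String) : Int :=
  checkB skill.toList skill_tree.toList 0

-- ===== PRECONDITION & SPEC =====
def Spec_check (skill : String) (skill_tree : String) (out : Int) : Prop := out = check_alt skill skill_tree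
instance (skill : String) (skill_tree : String) (out : Int) : Decidable (Spec_check skill skill_tree out) := by unfold Spec_check; infer_instance

-- ===== CLAIM (what is proved, stated in full; the proofs are below) =====
def Claim_equal_check : Prop := ∀ (skill : String) (skill_tree : String), Dom_check skill skill_tree → Spec_check skill skill_tree (check skill skill_tree)

-- ===== LEMMAS AND PROOFS =====
theorem checkB_eq_checkA (tree : List Char) (skill : List Char) (i : Nat) :
    checkB skill tree i = checkA (skill.drop i) tree := by
  induction tree generalizing i with
  | nil => cases h : skill.drop i <;> simp [checkB, checkA]
  | cons c cs ih =>
    cases h : skill.drop i with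
    | nil =>
      simp [checkB, checkA, ih i, h]
    | cons s ss =>
      have hget : skill[i]?.getD ' ' = s := by
        have h0 : skill[i]? = some s := by
          have h1 : (skill.drop i)[0]? = some s := by simp [h]
          rw [List.getElem?_drop] at h1
          simpa using h1
        simp [h0]
      have hdrop : skill.drop (i + 1) = ss := by
        have : skill.drop (i + 1) = (skill.drop i).drop 1 := by
          rw [← List.drop_drop]
        simp [this, h]
      by_cases hc : c ∈ skill.drop i
      · rw [h] at hc
        by_cases hne : c = s
        · simp [checkB, checkA, h, hget, hne, List.getD, ih (i+1), hdrop]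
        · simp [checkB, checkA, h, hc, hget, hne, List.getD]
      · rw [h] at hc
        simp [checkB, checkA, h, hc, ih i]

-- ===== VERDICT (by name: the statement is the Claim_ definition above) =====
theorem check_spec : Claim_equal_check := by
  intro skill skill_tree _
  unfold Spec_check check check_alt
  rw [checkB_eq_checkA]
  simp
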